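-- pv_equiv track=rewrite | github.com/Riakol/education-app | 04.10.24edutgapp - Copy/attendance_data.py | create_attendance_excel
-- ===== SOURCE A (Python) =====
-- def create_attendance_excel(data, month_name, year):
--     # Создаем словарь для хранения посещаемости
--     attendance_dict = {}
--
--     for row in data:
--         name = row['student_name']
--         day = int(row['day'])
--         status = row['status']
--
--         if name not in attendance_dict:
--             attendance_dict[name] = {}
--
--         attendance_dict[name][day] = status
--
--     # Формируем сообщение
--     message_lines = []
--     days = list(range(1, 32))
--
--     for name in attendance_dict:
--         attendance_row = f"• {name}: "
--         attendance_days = []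
--         for day in days:
--             status = attendance_dict[name].get(day, '')
--             if status == 'present':
--                 attendance_days.append(f"[{day} ✅]")
--             elif status == 'absent':
--                 attendance_days.append(f"[{day} ❌]")
--
--         attendance_row += ', '.join(attendance_days) + ';'
--         message_lines.append(attendance_row)
--
--     # Объединяем все строки в одно сообщение
--     message = f"{month_name} {year}:\n" + '\n'.join(message_lines)
--     return message
-- ===== SOURCE B (Python) =====
-- def create_attendance_excel(data, month_name, year):
--     attendance = {}
--     for row in data:
--         attendance.setdefault(row['student_name'], {})[int(row['day'])] = row['status']
--
--     lines = []
--     for name, days in attendance.items():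
--         marked = sorted(d for d in days
--                         if 1 <= d <= 31 and days[d] in ('present', 'absent'))
--         marks = ', '.join(f"[{d} \u2705]" if days[d] == 'present' else f"[{d} \u274c]"
--                           for d in marked)
--         lines.append(f"\u2022 {name}: {marks};")
--
--     return f"{month_name} {year}:\n" + '\n'.join(lines)
-- ===== Notes on version B (the rewrite author's own statement) =====
-- stated objective: simpler
-- what changed: Each student's line is built from the sorted recorded days (filtered to 1..31 with status 'present'/'absent') instead of probing all 31 calendar slots, with the dict built via setdefault and the lines via a comprehension over items.
import Mathlib
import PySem

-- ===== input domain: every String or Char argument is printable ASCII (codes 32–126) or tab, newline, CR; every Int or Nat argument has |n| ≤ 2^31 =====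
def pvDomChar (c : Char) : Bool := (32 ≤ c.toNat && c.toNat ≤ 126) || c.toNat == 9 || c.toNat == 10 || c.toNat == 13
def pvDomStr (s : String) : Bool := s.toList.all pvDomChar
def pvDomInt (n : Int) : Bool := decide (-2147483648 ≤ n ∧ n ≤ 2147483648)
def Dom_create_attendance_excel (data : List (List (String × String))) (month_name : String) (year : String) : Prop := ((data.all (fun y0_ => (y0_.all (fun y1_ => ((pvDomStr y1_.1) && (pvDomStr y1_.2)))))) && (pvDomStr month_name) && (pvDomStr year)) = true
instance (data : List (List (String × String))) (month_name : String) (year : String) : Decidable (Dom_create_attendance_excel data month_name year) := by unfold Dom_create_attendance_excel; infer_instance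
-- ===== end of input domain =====

-- B builds each student's line from the sorted recorded days (filtered to 1..31 with a
-- known status) instead of probing all 31 calendar slots; same return value on Pre_.


-- ===== PORT A =====
-- A's dict-building loop: if name not in dict: dict[name] = {}; dict[name][day] = status
def pvStepA (ad : PySem.Dict String (PySem.Dict Int String)) (row : List (String × String)) :
    PySem.Dict String (PySem.Dict Int String) :=
  let rd : PySem.Dict String String := PySem.Dict.ofList row
  let name := (rd.get? "student_name").getD ""          -- KeyError = none, excluded by Pre_
  let day := (PySem.Int.ofStr? ((rd.get? "day").getD "")).getD 0  -- ValueError/KeyError excluded by Pre_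
  let status := (rd.get? "status").getD ""
  let ad1 := if ad.contains name then ad else ad.insert name PySem.Dict.empty
  ad1.insert name ((ad1.getD name PySem.Dict.empty).insert day status)

def create_attendance_excel (data : List (List (String × String))) (month_name : String) (year : String) : String :=
  let attendance_dict := data.foldl pvStepA PySem.Dict.empty
  let days := PySem.List.pyRange 1 32
  let message_lines := attendance_dict.keys.foldl (fun ls name =>
    let inner := attendance_dict.getD name PySem.Dict.empty
    let attendance_days := days.foldl (fun acc day =>
      let status := inner.getD day ""
      if status = "present" then acc ++ ["[" ++ PySem.Int.toStr day ++ " ✅]"]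
      else if status = "absent" then acc ++ ["[" ++ PySem.Int.toStr day ++ " ❌]"]
      else acc) []
    ls ++ ["• " ++ name ++ ": " ++ PySem.Str.join ", " attendance_days ++ ";"]) []
  month_name ++ " " ++ year ++ ":\n" ++ PySem.Str.join "\n" message_lines

-- ===== PORT B =====
def pvStepB (ad : PySem.Dict String (PySem.Dict Int String)) (row : List (String × String)) :
    PySem.Dict String (PySem.Dict Int String) :=
  let rd : PySem.Dict String String := PySem.Dict.ofList row
  let name := (rd.get? "student_name").getD ""
  let day := (PySem.Int.ofStr? ((rd.get? "day").getD "")).getD 0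
  let status := (rd.get? "status").getD ""
  let ad1 := ad.setdefault name PySem.Dict.empty
  ad1.insert name ((ad1.getD name PySem.Dict.empty).insert day status)

def pvMark (inner : PySem.Dict Int String) (d : Int) : String :=
  if inner.getD d "" = "present" then "[" ++ PySem.Int.toStr d ++ " ✅]"
  else "[" ++ PySem.Int.toStr d ++ " ❌]"

def pvGood (inner : PySem.Dict Int String) (d : Int) : Bool :=
  1 ≤ d && d ≤ 31 && (inner.getD d "" == "present" || inner.getD d "" == "absent")

def create_attendance_excel_alt (data : List (List (String × String))) (month_name : String) (year : String) : String :=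
  let attendance := data.foldl pvStepB PySem.Dict.empty
  let lines := attendance.items.map (fun p =>
    let name := p.1
    let inner := p.2
    let marked := PySem.List.sorted (inner.keys.filter (fun d => pvGood inner d)) (fun x => x)
    let marks := PySem.Str.join ", " (marked.map (pvMark inner))
    "• " ++ name ++ ": " ++ marks ++ ";")
  month_name ++ " " ++ year ++ ":\n" ++ PySem.Str.join "\n" lines

-- ===== PRECONDITION & SPEC =====
-- Pre_ excludes exactly the rows on which Python A raises: a missing 'student_name'/'day'/'status'
-- key (KeyError) or a 'day' value int() cannot parse (ValueError).
def Pre_create_attendance_excel (data : List (List (String × String))) (month_name : String) (year : String) : Prop :=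
  ∀ row ∈ data,
    ((PySem.Dict.ofList row).get? "student_name").isSome = true ∧
    (((PySem.Dict.ofList row).get? "day").bind PySem.Int.ofStr?).isSome = true ∧
    ((PySem.Dict.ofList row).get? "status").isSome = true
instance (data : List (List (String × String))) (month_name : String) (year : String) : Decidable (Pre_create_attendance_excel data month_name year) := by unfold Pre_create_attendance_excel; infer_instance

def pvWitness_create_attendance_excel : (List (List (String × String))) × String × String :=
  ([[("student_name", "Ann"), ("day", "3"), ("status", "present")],
    [("student_name", "Bob"), ("day", "7"), ("status", "absent")],
    [("student_name", "Ann"), ("day", "3"), ("status", "absent")]], "May", "2024")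

def Spec_create_attendance_excel (data : List (List (String × String))) (month_name : String) (year : String) (out : String) : Prop := out = create_attendance_excel_alt data month_name year
instance (data : List (List (String × String))) (month_name : String) (year : String) (out : String) : Decidable (Spec_create_attendance_excel data month_name year out) := by unfold Spec_create_attendance_excel; infer_instance

-- ===== CLAIM (what is proved, stated in full; the proofs are below) =====
def Claim_equal_create_attendance_excel : Prop := ∀ (data : List (List (String × String))) (month_name : String) (year : String), Dom_create_attendance_excel data month_name year → Pre_create_attendance_excel data month_name year → Spec_create_attendance_excel data month_name year (create_attendance_excel data month_name year)

-- ===== LEMMAS AND PROOFS =====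

theorem pvStepA_eq_stepB : pvStepA = pvStepB := by
  funext ad row
  simp only [pvStepA, pvStepB]
  by_cases h : ad.contains (((PySem.Dict.ofList row).get? "student_name").getD "") = true
  · rw [PySem.Dict.setdefault_of_contains _ _ h, if_pos h]
  · rw [PySem.Dict.setdefault_of_not_contains _ _ (by simpa using h), if_neg h]

-- the dict built by the loop has nodup outer keys and nodup keys in every inner dict
theorem pvBuild_inv (data : List (List (String × String)))
    (ad : PySem.Dict String (PySem.Dict Int String))
    (h1 : ad.keys.Nodup) (h2 : ∀ n, (ad.getD n PySem.Dict.empty).keys.Nodup) :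
    (data.foldl pvStepB ad).keys.Nodup ∧
      ∀ n, ((data.foldl pvStepB ad).getD n PySem.Dict.empty).keys.Nodup := by
  induction data generalizing ad with
  | nil => exact ⟨h1, h2⟩
  | cons row rest ih =>
    simp only [List.foldl_cons]
    apply ih
    · -- keys nodup after one step
      simp only [pvStepB]
      by_cases h : (PySem.Dict.contains ad (((PySem.Dict.ofList row).get? "student_name").getD "")) = true
      · rw [PySem.Dict.setdefault_of_contains _ _ h]
        exact PySem.Dict.nodup_keys_insert _ _ _ h1
      · rw [PySem.Dict.setdefault_of_not_contains _ _ (by simpa using h)]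
        exact PySem.Dict.nodup_keys_insert _ _ _ (PySem.Dict.nodup_keys_insert _ _ _ h1)
    · -- inner keys nodup after one step
      intro n
      simp only [pvStepB]
      by_cases h : (PySem.Dict.contains ad (((PySem.Dict.ofList row).get? "student_name").getD "")) = true
      · rw [PySem.Dict.setdefault_of_contains _ _ h, PySem.Dict.getD_insert]
        split_ifs with hn
        · exact PySem.Dict.nodup_keys_insert _ _ _ (by simpa [hn] using h2 _)
        · exact h2 n
      · rw [PySem.Dict.setdefault_of_not_contains _ _ (by simpa using h), PySem.Dict.getD_insert]
        split_ifs with hn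
        · apply PySem.Dict.nodup_keys_insert
          rw [PySem.Dict.getD_insert]
          split_ifs with hn2
          · exact PySem.Dict.nodup_keys_empty
          · exact h2 _
        · rw [PySem.Dict.getD_insert, if_neg hn]
          exact h2 n

theorem pvRange_pairwise : List.Pairwise (fun a b : Int => a < b) (PySem.List.pyRange 1 32) := by
  decide

-- core lemma: A's 31-slot probe equals B's sorted filtered recorded days
theorem pvRow_eq (inner : PySem.Dict Int String) (h : inner.keys.Nodup) :
    (PySem.List.pyRange 1 32).foldl (fun acc day =>
      let status := inner.getD day ""
      if status = "present" then acc ++ ["[" ++ PySem.Int.toStr day ++ " ✅]"]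
      else if status = "absent" then acc ++ ["[" ++ PySem.Int.toStr day ++ " ❌]"]
      else acc) []
    = (PySem.List.sorted (inner.keys.filter (fun d => pvGood inner d)) (fun x => x)).map (pvMark inner) := by
  have hcongr : (PySem.List.pyRange 1 32).foldl (fun acc day =>
      let status := inner.getD day ""
      if status = "present" then acc ++ ["[" ++ PySem.Int.toStr day ++ " ✅]"]
      else if status = "absent" then acc ++ ["[" ++ PySem.Int.toStr day ++ " ❌]"]
      else acc) []
    = (PySem.List.pyRange 1 32).foldl (fun acc day =>
      if (inner.getD day "" = "present" ∨ inner.getD day "" = "absent") then acc ++ [pvMark inner day]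
      else acc) [] := by
    apply PySem.List.foldl_congr_mem
    intro acc day _
    simp only [pvMark]
    by_cases hp : inner.getD day "" = "present"
    · simp [hp]
    · by_cases ha : inner.getD day "" = "absent"
      · simp [ha]
      · simp [hp, ha]
  rw [hcongr, PySem.List.foldl_append_ite
        (p := fun day => inner.getD day "" = "present" ∨ inner.getD day "" = "absent")
        (f := pvMark inner), List.nil_append]
  congr 1
  symm
  apply PySem.List.sorted_eq_of_perm_of_pairwise_lt
  · -- permutation: same elements, both nodup
    have hmemL : ∀ x : Int, x ∈ (PySem.List.pyRange 1 32).filter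
        (fun x => decide (inner.getD x "" = "present" ∨ inner.getD x "" = "absent")) ↔
        x ∈ inner.keys.filter (fun d => pvGood inner d) := by
      intro x
      simp only [List.mem_filter, PySem.List.mem_pyRange_one, pvGood, decide_eq_true_eq,
        Bool.and_eq_true, Bool.or_eq_true, beq_iff_eq]
      constructor
      · rintro ⟨⟨h1, h2⟩, hst⟩
        refine ⟨?_, ⟨h1, by omega⟩, hst⟩
        rw [← PySem.Dict.contains_iff_mem_keys]
        by_contra hc
        have he : inner.getD x "" = "" := PySem.Dict.getD_of_not_contains _ _ (by simpa using hc)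
        rcases hst with hst | hst <;> simp [he] at hst
      · rintro ⟨hk, ⟨h1, h2⟩, hst⟩
        exact ⟨⟨h1, by omega⟩, hst⟩
    rw [List.perm_ext_iff_of_nodup]
    · intro x; exact hmemL x
    · exact pvRange_pairwise.nodup.filter _
    · exact h.filter _
  · exact pvRange_pairwise.filter _

theorem pvLines_eq (ad : PySem.Dict String (PySem.Dict Int String))
    (h1 : ad.keys.Nodup) (h2 : ∀ n, (ad.getD n PySem.Dict.empty).keys.Nodup) :
    ad.keys.foldl (fun ls name =>
      let inner := ad.getD name PySem.Dict.empty
      let attendance_days := (PySem.List.pyRange 1 32).foldl (fun acc day =>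
        let status := inner.getD day ""
        if status = "present" then acc ++ ["[" ++ PySem.Int.toStr day ++ " ✅]"]
        else if status = "absent" then acc ++ ["[" ++ PySem.Int.toStr day ++ " ❌]"]
        else acc) []
      ls ++ ["• " ++ name ++ ": " ++ PySem.Str.join ", " attendance_days ++ ";"]) []
    = ad.items.map (fun p =>
      let name := p.1
      let inner := p.2
      let marked := PySem.List.sorted (inner.keys.filter (fun d => pvGood inner d)) (fun x => x)
      let marks := PySem.Str.join ", " (marked.map (pvMark inner))
      "• " ++ name ++ ": " ++ marks ++ ";") := by
  rw [PySem.List.foldl_append_singleton_eq_map, List.nil_append,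
      PySem.Dict.items_eq_map_keys ad h1 PySem.Dict.empty, List.map_map]
  apply List.map_congr_left
  intro name _
  simp only [Function.comp]
  rw [pvRow_eq _ (h2 name)]

-- ===== VERDICT (by name: the statement is the Claim_ definition above) =====
theorem create_attendance_excel_spec : Claim_equal_create_attendance_excel := by
  intro data month_name year _ _
  unfold Spec_create_attendance_excel create_attendance_excel create_attendance_excel_alt
  rw [pvStepA_eq_stepB]
  have hinv := pvBuild_inv data PySem.Dict.empty
    (by simpa using PySem.Dict.nodup_keys_empty)
    (by intro n; simpa [PySem.Dict.getD_empty] using PySem.Dict.nodup_keys_empty)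
  simp only []
  rw [pvLines_eq _ hinv.1 hinv.2]
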